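-- pv_equiv track=rewrite | github.com/sudiptap/algods | ds_algo/patterns/dynamic_programming/19_linear_dp/solutions/2638-count-the-number-of-k-free-subsets.py | countTheNumberOfKFreeSubsets
-- ===== SOURCE A (Python) =====
-- from typing import List
--
-- def countTheNumberOfKFreeSubsets(nums: List[int], k: int) -> int:
--     groups = {}
--     for x in nums:
--         groups.setdefault(x % k, []).append(x)
--
--     result = 1
--     for r, vals in groups.items():
--         vals.sort()
--         # House robber: skip = subsets not taking current, take = subsets taking current
--         skip, take = 1, 1  # start: can take or skip first element
--         for i in range(1, len(vals)):
--             if vals[i] - vals[i - 1] == k: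
--                 new_skip = skip + take
--                 new_take = skip
--                 skip, take = new_skip, new_take
--             else:
--                 # No conflict, both can extend freely
--                 skip, take = skip + take, skip + take
--         result *= (skip + take)
--
--     return result
-- ===== SOURCE B (Python) =====
-- def _fib2(L):
--     # number of independent sets of an L-vertex path: Fib(L+2), Fib(1)=Fib(2)=1
--     a, b = 1, 1
--     for _ in range(L):
--         a, b = b, a + b
--     return b
--
-- def _chain_product(vals, k):
--     # vals sorted ascending and nonempty: split into maximal chains of step k,
--     # multiply Fib(L+2) per chain of length L
--     out, run, prev = 1, 1, vals[0]
--     for cur in vals[1:]: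
--         if cur - prev == k:
--             run += 1
--         else:
--             out *= _fib2(run)
--             run = 1
--         prev = cur
--     return out * _fib2(run)
--
-- def countTheNumberOfKFreeSubsets(nums, k):
--     groups = {}
--     for x in nums:
--         groups.setdefault(x % k, []).append(x)
--     result = 1
--     for vals in groups.values():
--         result *= _chain_product(sorted(vals), k)
--     return result
-- ===== Notes on version B (the rewrite author's own statement) =====
-- stated objective: alternative
-- what changed: Replaces the per-group rolling house-robber DP over indices with a structural split of each sorted residue group into maximal step-k chains, multiplying a Fibonacci factor Fib(L+2) per chain of length L.
import Mathlib
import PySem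

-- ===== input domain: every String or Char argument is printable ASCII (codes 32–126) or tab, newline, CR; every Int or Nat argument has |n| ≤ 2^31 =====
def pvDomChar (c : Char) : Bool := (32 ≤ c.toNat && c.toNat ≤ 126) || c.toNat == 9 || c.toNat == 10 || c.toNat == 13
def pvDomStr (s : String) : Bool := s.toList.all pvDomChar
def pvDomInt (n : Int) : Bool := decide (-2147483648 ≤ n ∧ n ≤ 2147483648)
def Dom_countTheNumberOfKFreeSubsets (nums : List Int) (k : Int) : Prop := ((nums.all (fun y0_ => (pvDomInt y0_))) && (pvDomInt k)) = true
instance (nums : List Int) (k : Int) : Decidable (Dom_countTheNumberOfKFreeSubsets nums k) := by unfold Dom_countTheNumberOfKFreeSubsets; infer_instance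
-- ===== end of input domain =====

-- B replaces the per-group rolling house-robber DP by splitting each sorted residue group into maximal step-k chains with a Fibonacci factor per chain; same cost, different algorithm.


-- ===== PORT A =====
def countTheNumberOfKFreeSubsets (nums : List Int) (k : Int) : Int :=
  let groups := nums.foldl
    (fun (d : PySem.Dict Int (List Int)) x =>
      d.modify (PySem.Int.mod x k) [] (fun l => l ++ [x])) PySem.Dict.empty
  groups.items.foldl
    (fun result p =>
      let vals := PySem.List.sorted p.2 (fun v => v) false
      let st := (PySem.List.pyRange 1 (vals.length : Int) 1).foldl
        (fun (st : Int × Int) i =>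
          if PySem.List.pyGetD vals i 0 - PySem.List.pyGetD vals (i - 1) 0 = k
          then (st.1 + st.2, st.1)
          else (st.1 + st.2, st.1 + st.2)) (1, 1)
      result * (st.1 + st.2)) 1

-- ===== PORT B =====
-- _fib2(L): the 'for _ in range(L)' pair loop, as structural recursion on L
def pvFib2Go : Nat → Int × Int
  | 0 => (1, 1)
  | n + 1 => ((pvFib2Go n).2, (pvFib2Go n).1 + (pvFib2Go n).2)

def pvFib2 (L : Nat) : Int := (pvFib2Go L).2

-- the 'for cur in vals[1:]' loop of _chain_product, recursing on the tail
def pvChainGo (k : Int) : Int → Int → Nat → List Int → Int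
  | _, out, run, [] => out * pvFib2 run
  | prev, out, run, cur :: rest =>
      if cur - prev = k then pvChainGo k cur out (run + 1) rest
      else pvChainGo k cur (out * pvFib2 run) 1 rest

def pvChainProduct (k : Int) (vals : List Int) : Int :=
  match vals with
  | [] => 0          -- Python raises IndexError at vals[0]; never reached (groups are nonempty)
  | v :: rest => pvChainGo k v 1 1 rest

def countTheNumberOfKFreeSubsets_alt (nums : List Int) (k : Int) : Int :=
  let groups := nums.foldl
    (fun (d : PySem.Dict Int (List Int)) x =>
      d.modify (PySem.Int.mod x k) [] (fun l => l ++ [x])) PySem.Dict.empty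
  groups.values.foldl
    (fun result vs => result * pvChainProduct k (PySem.List.sorted vs (fun v => v) false)) 1

-- ===== PRECONDITION & SPEC =====
-- Pre_ excludes exactly k = 0 with nonempty nums, where the Python A (and B) raises ZeroDivisionError at x % k.
def Pre_countTheNumberOfKFreeSubsets (nums : List Int) (k : Int) : Prop := nums = [] ∨ k ≠ 0
instance (nums : List Int) (k : Int) : Decidable (Pre_countTheNumberOfKFreeSubsets nums k) := by unfold Pre_countTheNumberOfKFreeSubsets; infer_instance
def pvWitness_countTheNumberOfKFreeSubsets : List Int × Int := ([5, 4, 6], 1)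

def Spec_countTheNumberOfKFreeSubsets (nums : List Int) (k : Int) (out : Int) : Prop := out = countTheNumberOfKFreeSubsets_alt nums k
instance (nums : List Int) (k : Int) (out : Int) : Decidable (Spec_countTheNumberOfKFreeSubsets nums k out) := by unfold Spec_countTheNumberOfKFreeSubsets; infer_instance

-- ===== CLAIM (what is proved, stated in full; the proofs are below) =====
def Claim_equal_countTheNumberOfKFreeSubsets : Prop := ∀ (nums : List Int) (k : Int), Dom_countTheNumberOfKFreeSubsets nums k → Pre_countTheNumberOfKFreeSubsets nums k → Spec_countTheNumberOfKFreeSubsets nums k (countTheNumberOfKFreeSubsets nums k)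

-- ===== LEMMAS AND PROOFS =====

-- A's inner loop, rephrased as structural recursion over adjacent elements
def pvAFold (k : Int) : Int → Int × Int → List Int → Int × Int
  | _, st, [] => st
  | prev, st, cur :: rest =>
      pvAFold k cur (if cur - prev = k then (st.1 + st.2, st.1) else (st.1 + st.2, st.1 + st.2)) rest

theorem pvFib2Go_eq_fib (L : Nat) : pvFib2Go L = ((Nat.fib (L + 1) : Int), (Nat.fib (L + 2) : Int)) := by
  induction L with
  | zero => simp [pvFib2Go]
  | succ n ih =>
    rw [show pvFib2Go (n + 1) = ((pvFib2Go n).2, (pvFib2Go n).1 + (pvFib2Go n).2) from rfl, ih]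
    have h3 : Nat.fib (n + 1 + 2) = Nat.fib (n + 1) + Nat.fib (n + 2) := Nat.fib_add_two
    simp [h3]

theorem pvFib2_eq (L : Nat) : pvFib2 L = (Nat.fib (L + 2) : Int) := by
  simp [pvFib2, pvFib2Go_eq_fib]

-- A's indexed loop over pyRange 1 len equals pvAFold on the tail
theorem idxfold (k : Int) (rest : List Int) : ∀ (v : Int) (st : Int × Int),
    (List.range rest.length).foldl
      (fun st j =>
        if rest.getD j 0 - (v :: rest).getD j 0 = k
        then (st.1 + st.2, st.1) else (st.1 + st.2, st.1 + st.2)) st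
      = pvAFold k v st rest := by
  induction rest with
  | nil => intro v st; simp [pvAFold]
  | cons c t ih =>
    intro v st
    simp only [List.length_cons]
    rw [List.range_succ_eq_map]
    simp only [List.foldl_cons, List.foldl_map, List.getD_cons_zero, List.getD_cons_succ, pvAFold]
    exact ih c _

theorem inner_eq_pvAFold (k : Int) (v : Int) (rest : List Int) :
    (PySem.List.pyRange 1 ((v :: rest).length : Int) 1).foldl
      (fun (st : Int × Int) i =>
        if PySem.List.pyGetD (v :: rest) i 0 - PySem.List.pyGetD (v :: rest) (i - 1) 0 = k
        then (st.1 + st.2, st.1)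
        else (st.1 + st.2, st.1 + st.2)) (1, 1)
    = pvAFold k v (1, 1) rest := by
  rw [PySem.List.pyRange_one]
  have hlen : (((v :: rest).length : Int) - 1).toNat = rest.length := by simp
  rw [hlen, List.foldl_map]
  have h1 : ∀ j : Nat, PySem.List.pyGetD (v :: rest) (1 + (j : Int)) 0 = rest.getD j 0 := by
    intro j
    have hc : (1 : Int) + (j : Int) = ((j + 1 : Nat) : Int) := by push_cast; ring
    rw [hc, PySem.List.pyGetD_natCast]; simp
  have h2 : ∀ j : Nat, PySem.List.pyGetD (v :: rest) (1 + (j : Int) - 1) 0 = (v :: rest).getD j 0 := by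
    intro j
    have hc : (1 : Int) + (j : Int) - 1 = ((j : Nat) : Int) := by ring
    rw [hc, PySem.List.pyGetD_natCast]
  simp only [h1, h2]
  exact idxfold k rest v (1, 1)

-- pvAFold is linear in its state
theorem pvAFold_lin (k : Int) (t : List Int) : ∀ (prev P u v : Int),
    pvAFold k prev (P * u, P * v) t
      = (P * (pvAFold k prev (u, v) t).1, P * (pvAFold k prev (u, v) t).2) := by
  induction t with
  | nil => intro prev P u v; simp [pvAFold]
  | cons c r ih =>
    intro prev P u v
    simp only [pvAFold]
    by_cases h : c - prev = k <;> simp only [h, if_true, if_false] <;>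
      rw [show P * u + P * v = P * (u + v) by ring] <;>
      first
        | exact ih c P (u + v) u
        | exact ih c P (u + v) (u + v)

-- the core invariant: B's chain recursion computes A's skip+take
theorem chain_inv (k : Int) (rest : List Int) : ∀ (prev out : Int) (run : Nat),
    pvChainGo k prev out run rest
      = out * ((pvAFold k prev ((Nat.fib (run + 1) : Int), (Nat.fib run : Int)) rest).1
             + (pvAFold k prev ((Nat.fib (run + 1) : Int), (Nat.fib run : Int)) rest).2) := by
  induction rest with
  | nil =>
    intro prev out run
    simp only [pvChainGo, pvAFold, pvFib2_eq]
    rw [show run + 2 = run + 1 + 1 from rfl, Nat.fib_add_one (by omega)]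
    push_cast; ring
  | cons c t ih =>
    intro prev out run
    simp only [pvChainGo, pvAFold]
    by_cases h : c - prev = k
    · simp only [h, if_true]
      rw [ih c out (run + 1)]
      congr 2 <;>
        · congr 1
          simp [Nat.fib_add_two]; ring
    · simp only [h, if_false]
      rw [ih c (out * pvFib2 run) 1]
      have hs : ((Nat.fib (run + 1) : Int) + (Nat.fib run : Int)) = pvFib2 run := by
        rw [pvFib2_eq, Nat.fib_add_two]; push_cast; ring
      have : ((Nat.fib (run + 1) : Int) + (Nat.fib run : Int), (Nat.fib (run + 1) : Int) + (Nat.fib run : Int))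
          = (pvFib2 run * (Nat.fib 2 : Int), pvFib2 run * (Nat.fib 1 : Int)) := by
        simp [← hs, Nat.fib_one, Nat.fib_two]
      rw [this, pvAFold_lin]
      ring

-- per nonempty group: B's factor equals A's factor
theorem group_factor (k : Int) (v : Int) (rest : List Int) :
    pvChainProduct k (v :: rest)
      = ((PySem.List.pyRange 1 ((v :: rest).length : Int) 1).foldl
          (fun (st : Int × Int) i =>
            if PySem.List.pyGetD (v :: rest) i 0 - PySem.List.pyGetD (v :: rest) (i - 1) 0 = k
            then (st.1 + st.2, st.1)
            else (st.1 + st.2, st.1 + st.2)) (1, 1)).1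
        + ((PySem.List.pyRange 1 ((v :: rest).length : Int) 1).foldl
          (fun (st : Int × Int) i =>
            if PySem.List.pyGetD (v :: rest) i 0 - PySem.List.pyGetD (v :: rest) (i - 1) 0 = k
            then (st.1 + st.2, st.1)
            else (st.1 + st.2, st.1 + st.2)) (1, 1)).2 := by
  rw [inner_eq_pvAFold]
  have := chain_inv k rest v 1 1
  simp only [Nat.fib_one, Nat.cast_one] at this
  simpa [pvChainProduct] using this

-- every value list in the groups dict is nonempty
theorem groups_vals_ne_nil (nums : List Int) (k : Int) (r : Int) (vs : List Int)
    (hp : (r, vs) ∈ (nums.foldl (fun (d : PySem.Dict Int (List Int)) x =>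
        d.modify (PySem.Int.mod x k) [] (fun l => l ++ [x])) PySem.Dict.empty).items) :
    vs ≠ [] := by
  set key : Int → Int := fun x => PySem.Int.mod x k with hkey
  set G := nums.foldl (fun (d : PySem.Dict Int (List Int)) x =>
      d.modify (key x) [] (fun l => l ++ [x])) PySem.Dict.empty with hG
  have hnodup : G.keys.Nodup :=
    PySem.Dict.nodup_keys_foldl_modify_key nums key [] (fun _ x l => l ++ [x])
      PySem.Dict.empty (by simp)
  have hget := PySem.Dict.getD_of_mem_items G hp hnodup []
  have hfold : G = (nums.map (fun x => (key x, x))).foldl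
      (fun d p => d.modify p.1 [] (fun l => l ++ [p.2])) PySem.Dict.empty := by
    rw [hG, List.foldl_map]
  have hgv := PySem.Dict.getD_foldl_modify_append
    (nums.map (fun x => (key x, x))) PySem.Dict.empty r
  rw [← hfold] at hgv
  rw [hgv] at hget
  have hmemk : r ∈ G.keys := PySem.Dict.mem_keys_of_mem_items G hp
  have hkeys := PySem.Dict.keys_foldl_modify_key nums key [] (fun _ x l => l ++ [x])
    PySem.Dict.empty
  rw [← hG] at hkeys
  rw [hkeys] at hmemk
  have hx : ∃ x ∈ nums, key x = r := by
    have : r ∈ nums.map key := by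
      simpa [PySem.Set.mem_update] using hmemk
    simpa using this
  obtain ⟨x, hxmem, hxkey⟩ := hx
  intro hnil
  rw [hnil] at hget
  have hmemf : (key x, x) ∈ ((nums.map fun y => (key y, y)).filter (fun p => p.1 == r)) :=
    List.mem_filter.mpr ⟨List.mem_map.mpr ⟨x, hxmem, rfl⟩, by simp [hxkey]⟩
  have : x ∈ ((nums.map fun y => (key y, y)).filter (fun p => p.1 == r)).map (fun p => p.2) :=
    List.mem_map.mpr ⟨(key x, x), hmemf, rfl⟩
  simp only [PySem.Dict.getD_empty, List.nil_append] at hget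
  rw [hget] at this
  exact absurd this (by simp)

-- ===== VERDICT (by name: the statement is the Claim_ definition above) =====
theorem countTheNumberOfKFreeSubsets_spec : Claim_equal_countTheNumberOfKFreeSubsets := by
  intro nums k _ _
  unfold Spec_countTheNumberOfKFreeSubsets
  unfold countTheNumberOfKFreeSubsets countTheNumberOfKFreeSubsets_alt
  simp only []
  set groups := nums.foldl
    (fun (d : PySem.Dict Int (List Int)) x =>
      d.modify (PySem.Int.mod x k) [] (fun l => l ++ [x])) PySem.Dict.empty with hg
  have hv : groups.values = groups.items.map (·.2) := rfl
  rw [hv, List.foldl_map]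
  have hne : ∀ p ∈ groups.items, p.2 ≠ [] := by
    rintro ⟨r, vs⟩ hp
    exact groups_vals_ne_nil nums k r vs hp
  -- per-item equality of the two folds, over any item list with nonempty values
  have main : ∀ (ps : List (Int × List Int)) (init : Int), (∀ p ∈ ps, p.2 ≠ []) →
      ps.foldl
        (fun result p =>
          let vals := PySem.List.sorted p.2 (fun v => v) false
          let st := (PySem.List.pyRange 1 (vals.length : Int) 1).foldl
            (fun (st : Int × Int) i =>
              if PySem.List.pyGetD vals i 0 - PySem.List.pyGetD vals (i - 1) 0 = k
              then (st.1 + st.2, st.1)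
              else (st.1 + st.2, st.1 + st.2)) (1, 1)
          result * (st.1 + st.2)) init
      = ps.foldl
        (fun result p => result * pvChainProduct k (PySem.List.sorted p.2 (fun v => v) false)) init := by
    intro ps
    induction ps with
    | nil => intro init _; rfl
    | cons p t ih =>
      intro init hps
      simp only [List.foldl_cons]
      have hpne : p.2 ≠ [] := hps p (List.mem_cons_self ..)
      have hsne : PySem.List.sorted p.2 (fun v => v) false ≠ [] := by
        intro h
        apply hpne
        have := PySem.List.length_sorted p.2 (fun v => v) false
        rw [h] at this
        exact List.eq_nil_of_length_eq_zero this.symm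
      obtain ⟨v, rest, hvr⟩ := List.exists_cons_of_ne_nil hsne
      rw [hvr, group_factor k v rest, ← hvr]
      exact ih _ (fun q hq => hps q (List.mem_cons_of_mem _ hq))
  exact main groups.items 1 hne
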